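-- pv_equiv track=rewrite | github.com/Zeydel/Advent-Of-Code | AoC15/Day11/Day11.py | smartIncrement
-- ===== SOURCE A (Python) =====
-- def smartIncrement(password):
--
--     # If the final letter is not a z, just increment it
--     if ord(password[-1]) < 122:
--         return password[0:-1] + chr(ord(password[-1])+1)
--     else:
--         # If the final character is a z, remove it from the password and
--         # increment
--         password = smartIncrement(password[0:-1])
--
--         # Replace illegal characters with the next one in the alphabet
--         if password[-1] == 'i':
--             password = password[0:-1] + 'j'
--         if password[-1] == 'o':
--             password = password[0:-1] + 'p'
--         if password[-1] == 'l':
--             password = password[0:-1] + 'm'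
--
--         # Return the password concatonated with a to account for the removed z
--         return password + 'a'
-- ===== SOURCE B (Python) =====
-- def smartIncrement(password):
--     # Iterative odometer: find rightmost character below 'z', bump it once
--     # (skipping i/o/l only when at least one trailing char was rolled over),
--     # and pad with 'a's for the rolled-over suffix.
--     i = len(password) - 1
--     while i >= 0 and password[i] >= 'z':
--         i -= 1
--     newc = chr(ord(password[i]) + 1)
--     trailing = len(password) - 1 - i
--     if trailing > 0 and newc in 'iol':
--         newc = chr(ord(newc) + 1)
--     return password[:i] + newc + 'a' * trailing
-- ===== Notes on version B (the rewrite author's own statement) =====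
-- stated objective: simpler
-- what changed: Replaces the recursion over trailing rolled-over characters (with i/o/l fixups re-applied at every recursion level) by a single right-to-left scan that finds the rightmost incrementable character, bumps it once (skipping i/o/l only when something rolled over), and pads with 'a's.
import Mathlib
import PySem

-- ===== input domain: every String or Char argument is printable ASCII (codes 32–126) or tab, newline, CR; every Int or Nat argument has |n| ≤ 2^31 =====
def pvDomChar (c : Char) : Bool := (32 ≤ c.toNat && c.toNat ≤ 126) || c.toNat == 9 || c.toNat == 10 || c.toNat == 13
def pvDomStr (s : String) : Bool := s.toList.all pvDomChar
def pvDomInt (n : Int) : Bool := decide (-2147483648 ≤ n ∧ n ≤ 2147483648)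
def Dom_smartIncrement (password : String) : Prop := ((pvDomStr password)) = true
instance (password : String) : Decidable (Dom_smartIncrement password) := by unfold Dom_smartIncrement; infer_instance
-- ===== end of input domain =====

-- B replaces A's recursion over trailing rolled-over characters by one right-to-left
-- scan plus a single i/o/l fixup (objective: simpler). Return value only; no mutation.

-- ===== PORT A =====
-- the three sequential "replace illegal last character" ifs of A
def pvFixups (p : List Char) : List Char :=
  let p1 := if PySem.List.pyGet? p (-1) = some 'i' then p.dropLast ++ ['j'] else p
  let p2 := if PySem.List.pyGet? p1 (-1) = some 'o' then p1.dropLast ++ ['p'] else p1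
  if PySem.List.pyGet? p2 (-1) = some 'l' then p2.dropLast ++ ['m'] else p2

def pvAuxA (l : List Char) : List Char :=
  match h : PySem.List.pyGet? l (-1) with
  | none => []   -- password[-1] raises IndexError on empty input (outside Pre_)
  | some c =>
    if c.toNat < 122 then
      l.dropLast ++ [Char.ofNat (c.toNat + 1)]
    else
      pvFixups (pvAuxA l.dropLast) ++ ['a']
termination_by l.length
decreasing_by
  have hne : l ≠ [] := by
    intro e; subst e; simp [PySem.List.pyGet?] at h
  have : 0 < l.length := List.length_pos_iff.mpr hne
  simp [List.length_dropLast]; omega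

def smartIncrement (password : String) : String := String.mk (pvAuxA password.toList)

-- ===== PORT B =====
-- the right-to-left scan: returns i+1 where i is the loop's final index
def pvFindK (l : List Char) : Nat → Nat
  | 0 => 0
  | k + 1 => if 122 ≤ (l.getD k 'a').toNat then pvFindK l k else k + 1

def pvAuxB (l : List Char) : List Char :=
  let k := pvFindK l l.length
  match PySem.List.pyGet? l ((k : Int) - 1) with
  | none => []   -- password[i] raises IndexError on empty input (outside Pre_)
  | some c =>
    let raw := Char.ofNat (c.toNat + 1)
    let trailing := l.length - k
    let newc := if 0 < trailing ∧ (raw = 'i' ∨ raw = 'o' ∨ raw = 'l')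
                then Char.ofNat (raw.toNat + 1) else raw
    PySem.List.slice l none (some ((k : Int) - 1)) ++ [newc] ++ List.replicate trailing 'a'

def smartIncrement_alt (password : String) : String := String.mk (pvAuxB password.toList)

-- ===== PRECONDITION & SPEC =====
-- Pre_ excludes exactly the inputs on which A raises IndexError: the empty string and
-- strings all of whose characters are ≥ 'z' (A recurses off the left end).
def Pre_smartIncrement (password : String) : Prop :=
  password.toList.any (fun c => decide (c.toNat < 122)) = true
instance (password : String) : Decidable (Pre_smartIncrement password) := by
  unfold Pre_smartIncrement; infer_instance

def pvWitness_smartIncrement : String := "abc"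

def Spec_smartIncrement (password : String) (out : String) : Prop := out = smartIncrement_alt password
instance (password : String) (out : String) : Decidable (Spec_smartIncrement password out) := by unfold Spec_smartIncrement; infer_instance

-- ===== CLAIM (what is proved, stated in full; the proofs are below) =====
def Claim_equal_smartIncrement : Prop := ∀ (password : String), Dom_smartIncrement password → Pre_smartIncrement password → Spec_smartIncrement password (smartIncrement password)

-- ===== LEMMAS AND PROOFS =====

theorem pvAuxA_concat_lt (t : List Char) (c : Char) (h : c.toNat < 122) :
    pvAuxA (t ++ [c]) = t ++ [Char.ofNat (c.toNat + 1)] := by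
  rw [pvAuxA]
  split
  · next heq => simp [PySem.List.pyGet?_neg_one_append_singleton] at heq
  · next c1 heq =>
      rw [PySem.List.pyGet?_neg_one_append_singleton] at heq
      cases heq
      simp [h, List.dropLast_concat]

theorem pvAuxA_concat_ge (t : List Char) (c : Char) (h : 122 ≤ c.toNat) :
    pvAuxA (t ++ [c]) = pvFixups (pvAuxA t) ++ ['a'] := by
  rw [pvAuxA]
  split
  · next heq => simp [PySem.List.pyGet?_neg_one_append_singleton] at heq
  · next c1 heq =>
      rw [PySem.List.pyGet?_neg_one_append_singleton] at heq
      cases heq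
      simp [Nat.not_lt.mpr h, List.dropLast_concat]

def pvCorr (x : Char) : Char :=
  if x = 'i' then 'j' else if x = 'o' then 'p' else if x = 'l' then 'm' else x

theorem pvFixups_concat (T : List Char) (x : Char) :
    pvFixups (T ++ [x]) = T ++ [pvCorr x] := by
  by_cases hi : x = 'i'
  · subst hi; simp [pvFixups, pvCorr, PySem.List.pyGet?_neg_one_append_singleton,
      List.dropLast_concat]
  · by_cases ho : x = 'o'
    · subst ho; simp [pvFixups, pvCorr, PySem.List.pyGet?_neg_one_append_singleton,
        List.dropLast_concat]
    · by_cases hl : x = 'l'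
      · subst hl; simp [pvFixups, pvCorr, PySem.List.pyGet?_neg_one_append_singleton,
          List.dropLast_concat]
      · simp [pvFixups, pvCorr, PySem.List.pyGet?_neg_one_append_singleton, hi, ho, hl]

theorem pvCorr_eq (x : Char) :
    pvCorr x = if (x = 'i' ∨ x = 'o' ∨ x = 'l') then Char.ofNat (x.toNat + 1) else x := by
  by_cases hi : x = 'i'
  · subst hi; decide
  · by_cases ho : x = 'o'
    · subst ho; decide
    · by_cases hl : x = 'l'
      · subst hl; decide
      · simp [pvCorr, hi, ho, hl]

theorem pvFindK_le (l : List Char) (j : Nat) : pvFindK l j ≤ j := by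
  induction j with
  | zero => simp [pvFindK]
  | succ k ih => rw [pvFindK]; split <;> omega

theorem pvFindK_append (t : List Char) (c : Char) :
    ∀ j, j ≤ t.length → pvFindK (t ++ [c]) j = pvFindK t j := by
  intro j
  induction j with
  | zero => intro _; rfl
  | succ k ih =>
    intro hk
    have hk' : k < t.length := by omega
    have : (t ++ [c]).getD k 'a' = t.getD k 'a' := by
      simp [List.getD, List.getElem?_append_left hk']
    rw [pvFindK, pvFindK, this, ih (by omega)]

theorem pvFindK_spec (l : List Char) :
    ∀ j, j ≤ l.length → (∃ i, i < j ∧ (l.getD i 'a').toNat < 122) →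
      0 < pvFindK l j ∧ (l.getD (pvFindK l j - 1) 'a').toNat < 122 := by
  intro j
  induction j with
  | zero => rintro _ ⟨i, hi, _⟩; omega
  | succ k ih =>
    rintro hj ⟨i, hi, hsmall⟩
    rw [pvFindK]
    by_cases hbig : 122 ≤ (l.getD k 'a').toNat
    · have hik : i < k := by
        rcases Nat.lt_succ_iff_lt_or_eq.mp hi with h | h
        · exact h
        · subst h; omega
      simp only [hbig, if_true]
      exact ih (by omega) ⟨i, hik, hsmall⟩
    · simp only [hbig, if_false]
      constructor
      · omega
      · simpa using Nat.not_le.mp hbig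

-- the main equivalence, by strong induction on length via a fuel bound
theorem pvAux_eq (n : Nat) :
    ∀ l : List Char, l.length ≤ n → (∃ c ∈ l, c.toNat < 122) → pvAuxA l = pvAuxB l := by
  induction n with
  | zero =>
    rintro l hl ⟨c, hc, _⟩
    have := List.length_pos_of_mem hc
    omega
  | succ n ih =>
    rintro l hl hex
    rcases l.eq_nil_or_concat' with rfl | ⟨t, c, rfl⟩
    · rcases hex with ⟨c, hc, _⟩; simp at hc
    · by_cases hc : c.toNat < 122
      · -- last character directly incrementable: no rollover
        rw [pvAuxA_concat_lt t c hc]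
        have hk : pvFindK (t ++ [c]) (t ++ [c]).length = t.length + 1 := by
          have : (t ++ [c]).getD t.length 'a' = c := by
            simp [List.getD]
          simp [pvFindK, this, Nat.not_le.mpr hc]
        rw [pvAuxB]
        simp only [hk]
        have hget : PySem.List.pyGet? (t ++ [c]) ((((t.length + 1 : Nat)) : Int) - 1)
            = some c := by
          push_cast
          simp [PySem.List.pyGet?_natCast]
        rw [show (((t.length + 1 : Nat)) : Int) - 1 = ((t.length : Nat) : Int) by push_cast; ring] at hget ⊢
        rw [hget]
        have htr : (t ++ [c]).length - (t.length + 1) = 0 := by simp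
        simp [htr, PySem.List.slice_to_natCast]
      · -- last character rolls over to 'a'
        have hc' : 122 ≤ c.toNat := Nat.not_lt.mp hc
        have hext : ∃ d ∈ t, d.toNat < 122 := by
          rcases hex with ⟨d, hd, hds⟩
          rcases List.mem_append.mp hd with h | h
          · exact ⟨d, h, hds⟩
          · simp at h; subst h; omega
        have hlent : 0 < t.length := by
          rcases hext with ⟨d, hd, _⟩; exact List.length_pos_of_mem hd
        -- findK on t: an index form of the precondition
        have hexi : ∃ i, i < t.length ∧ (t.getD i 'a').toNat < 122 := by
          rcases hext with ⟨d, hd, hds⟩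
          rcases List.mem_iff_getElem.mp hd with ⟨i, hi, rfl⟩
          exact ⟨i, hi, by simpa [List.getD, List.getElem?_eq_getElem hi] using hds⟩
        obtain ⟨hkpos, hksmall⟩ := pvFindK_spec t t.length le_rfl hexi
        set k := pvFindK t t.length with hkdef
        have hkle : k ≤ t.length := pvFindK_le t t.length
        -- findK on t ++ [c] agrees
        have hkfull : pvFindK (t ++ [c]) (t ++ [c]).length = k := by
          have h1 : (t ++ [c]).getD t.length 'a' = c := by simp [List.getD]
          have : (t ++ [c]).length = t.length + 1 := by simp
          rw [this, pvFindK, h1, if_pos hc', pvFindK_append t c t.length le_rfl]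
        -- the character found, and both pyGet?s
        set c' := t.getD (k - 1) 'a' with hc'def
        have hgett : PySem.List.pyGet? t (((k : Nat) : Int) - 1) = some c' := by
          rw [show (((k : Nat) : Int) - 1) = (((k - 1 : Nat)) : Int) by omega]
          simp [PySem.List.pyGet?_natCast, hc'def, List.getD,
            List.getElem?_eq_getElem (show k - 1 < t.length by omega)]
        have hgetl : PySem.List.pyGet? (t ++ [c]) (((k : Nat) : Int) - 1) = some c' := by
          rw [show (((k : Nat) : Int) - 1) = (((k - 1 : Nat)) : Int) by omega]
          have hlt : k - 1 < t.length := by omega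
          simp [PySem.List.pyGet?_natCast, hc'def, List.getD,
            List.getElem?_append_left hlt, List.getElem?_eq_getElem hlt]
        -- slices
        have hslt : PySem.List.slice t none (some (((k : Nat) : Int) - 1)) = t.take (k - 1) := by
          rw [show (((k : Nat) : Int) - 1) = (((k - 1 : Nat)) : Int) by omega]
          exact PySem.List.slice_to_natCast t (k - 1)
        have hsll : PySem.List.slice (t ++ [c]) none (some (((k : Nat) : Int) - 1))
            = t.take (k - 1) := by
          rw [show (((k : Nat) : Int) - 1) = (((k - 1 : Nat)) : Int) by omega]
          rw [PySem.List.slice_to_natCast]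
          exact List.take_append_of_le_length (by omega)
        set raw := Char.ofNat (c'.toNat + 1) with hrawdef
        set T := t.take (k - 1) with hTdef
        -- A side: rewrite recursive call with the IH
        have hiht : pvAuxA t = pvAuxB t :=
          ih t (by simp at hl; omega) hext
        rw [pvAuxA_concat_ge t c hc', hiht]
        have hBt : pvAuxB t = T ++ [if 0 < t.length - k ∧ (raw = 'i' ∨ raw = 'o' ∨ raw = 'l')
              then Char.ofNat (raw.toNat + 1) else raw] ++ List.replicate (t.length - k) 'a' := by
          rw [pvAuxB]
          simp only [← hkdef, hgett, hslt]
          rw [← hrawdef]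
        have hBl : pvAuxB (t ++ [c]) = T ++ [if (raw = 'i' ∨ raw = 'o' ∨ raw = 'l')
              then Char.ofNat (raw.toNat + 1) else raw]
              ++ List.replicate (t.length - k + 1) 'a' := by
          rw [pvAuxB]
          simp only [hkfull, hgetl, hsll]
          have h1 : (t ++ [c]).length - k = t.length - k + 1 := by simp; omega
          have h2 : (0 < t.length - k + 1) = True := by simp
          rw [h1]
          simp only [Nat.succ_pos, true_and]
          rw [← hrawdef]
        rw [hBt, hBl]
        by_cases htr : 0 < t.length - k
        · -- something already rolled over below: last char of pvAuxB t is 'a'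
          obtain ⟨m, hm⟩ : ∃ m, t.length - k = m + 1 := ⟨t.length - k - 1, by omega⟩
          rw [hm]
          have hstep : T ++ [if 0 < m + 1 ∧ (raw = 'i' ∨ raw = 'o' ∨ raw = 'l')
                then Char.ofNat (raw.toNat + 1) else raw] ++ List.replicate (m + 1) 'a'
              = (T ++ [if (raw = 'i' ∨ raw = 'o' ∨ raw = 'l')
                then Char.ofNat (raw.toNat + 1) else raw] ++ List.replicate m 'a') ++ ['a'] := by
            rw [show List.replicate (m + 1) 'a' = List.replicate m 'a' ++ ['a'] from
              List.replicate_succ' ..]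
            simp [List.append_assoc]
          rw [hstep, pvFixups_concat _ 'a']
          have hca : pvCorr 'a' = 'a' := by decide
          rw [hca]
          rw [show List.replicate (m + 1 + 1) 'a' = List.replicate (m + 1) 'a' ++ ['a'] from
            List.replicate_succ' ..]
          rw [show List.replicate (m + 1) 'a' = List.replicate m 'a' ++ ['a'] from
            List.replicate_succ' ..]
          simp [List.append_assoc]
        · -- nothing rolled over below: fixups act on the freshly incremented character
          have hm0 : t.length - k = 0 := by omega
          rw [hm0]
          simp only [List.replicate_zero, List.append_nil, Nat.lt_irrefl, false_and, if_false,
            Nat.zero_add, List.replicate_one]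
          rw [pvFixups_concat T raw, pvCorr_eq raw]

-- ===== VERDICT (by name: the statement is the Claim_ definition above) =====
theorem smartIncrement_spec : Claim_equal_smartIncrement := by
  intro password _ hpre
  unfold Spec_smartIncrement smartIncrement smartIncrement_alt
  have hex : ∃ c ∈ password.toList, c.toNat < 122 := by
    simpa using List.any_eq_true.mp hpre
  rw [pvAux_eq password.toList.length password.toList le_rfl hex]
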